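-- pv_equiv track=rewrite | github.com/abelyazi/memoire | notebooks/useful_functions.py | get_outcome
-- ===== SOURCE A (Python) =====
-- def get_outcome(data):
--     outcome = None
--     for l in data.split('\n'):
--         if l.startswith('#Outcome:'):
--             try:
--                 outcome = l.split(': ')[1]
--             except:
--                 pass
--     if outcome is None:
--         raise ValueError('No outcome available. Is your code trying to load labels from the hidden data?')
--     return outcome
-- ===== SOURCE B (Python) =====
-- def get_outcome(data):
--     for l in reversed(data.split('\n')):
--         if l.startswith('#Outcome:'):
--             parts = l.split(': ')
--             if len(parts) > 1:
--                 return parts[1]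
--     raise ValueError('No outcome available. Is your code trying to load labels from the hidden data?')
-- ===== Notes on version B (the rewrite author's own statement) =====
-- stated objective: alternative
-- what changed: A scans all lines forward, overwriting an accumulator with each parseable outcome line and returning the accumulator at the end; B scans the lines in reverse and returns immediately at the first parseable outcome line it meets, with no accumulator.
import Mathlib
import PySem

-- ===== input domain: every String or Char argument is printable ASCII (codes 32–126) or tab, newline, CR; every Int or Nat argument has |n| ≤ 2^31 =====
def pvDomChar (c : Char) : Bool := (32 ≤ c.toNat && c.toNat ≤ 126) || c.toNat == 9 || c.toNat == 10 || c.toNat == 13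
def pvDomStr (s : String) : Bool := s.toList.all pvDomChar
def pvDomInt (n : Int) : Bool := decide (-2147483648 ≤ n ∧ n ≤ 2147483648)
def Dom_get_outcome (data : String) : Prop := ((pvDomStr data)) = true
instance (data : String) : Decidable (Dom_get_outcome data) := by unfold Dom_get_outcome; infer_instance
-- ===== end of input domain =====

-- B replaces A's forward scan with a 'last outcome' accumulator by a reverse scan
-- returning the first valid '#Outcome:' line (early exit); same values everywhere A returns.

-- ===== PORT A =====
-- one loop step of A: overwrite the accumulator when l.split(': ')[1] succeeds (try/except: keep acc on IndexError)
def aStep (acc : Option String) (l : String) : Option String :=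
  if PySem.Str.startswith l "#Outcome:" then
    match ((PySem.Str.split? l ": ").getD [])[1]? with
    | some v => some v
    | none => acc
  else acc

def get_outcome (data : String) : String :=
  let outcome := ((PySem.Str.split? data "\n").getD []).foldl aStep none
  -- Python raises ValueError when outcome is None; those inputs are outside Pre_get_outcome
  outcome.getD ""

-- ===== PORT B =====
-- reverse scan: first line that startswith '#Outcome:' and whose split(': ') has >1 parts wins
def altFind : List String → Option String
  | [] => none
  | l :: rest =>
    if PySem.Str.startswith l "#Outcome:" then
      let parts := (PySem.Str.split? l ": ").getD []
      if 1 < parts.length then parts[1]? else altFind rest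
    else altFind rest

def get_outcome_alt (data : String) : String :=
  -- B raises the same ValueError when no line matches; those inputs are outside Pre_get_outcome
  (altFind ((PySem.Str.split? data "\n").getD []).reverse).getD ""

-- ===== PRECONDITION & SPEC =====
-- Pre_ excludes exactly the inputs with no valid '#Outcome: …' line, on which both A and B raise ValueError.
def Pre_get_outcome (data : String) : Prop :=
  ∃ l ∈ (PySem.Str.split? data "\n").getD [],
    PySem.Str.startswith l "#Outcome:" = true ∧ 1 < ((PySem.Str.split? l ": ").getD []).length
instance (data : String) : Decidable (Pre_get_outcome data) := by unfold Pre_get_outcome; infer_instance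

def pvWitness_get_outcome : String := "#Outcome: heart attack\nrest"

def Spec_get_outcome (data : String) (out : String) : Prop := out = get_outcome_alt data
instance (data : String) (out : String) : Decidable (Spec_get_outcome data out) := by unfold Spec_get_outcome; infer_instance

-- ===== CLAIM (what is proved, stated in full; the proofs are below) =====
def Claim_equal_get_outcome : Prop := ∀ (data : String), Dom_get_outcome data → Pre_get_outcome data → Spec_get_outcome data (get_outcome data)

-- ===== LEMMAS AND PROOFS =====
theorem altFind_append (xs ys : List String) :
    altFind (xs ++ ys) = (altFind xs).or (altFind ys) := by
  induction xs with
  | nil => simp [altFind]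
  | cons l rest ih =>
    simp only [List.cons_append, altFind]
    split_ifs with h1 h2
    · obtain ⟨v, hv⟩ : ∃ v, (((PySem.Str.split? l ": ").getD [])[1]? : Option String) = some v :=
        ⟨_, List.getElem?_eq_getElem h2⟩
      simp [hv]
    · exact ih
    · exact ih

theorem foldl_aStep_eq (lines : List String) (acc : Option String) :
    lines.foldl aStep acc = (altFind lines.reverse).or acc := by
  induction lines generalizing acc with
  | nil => simp [altFind]
  | cons l rest ih =>
    simp only [List.foldl_cons, List.reverse_cons, altFind_append, ih, Option.or_assoc]
    congr 1
    -- altFind [l] |>.or acc = aStep acc l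
    simp only [altFind, aStep]
    split_ifs with h1 h2
    · -- 1 < parts.length : parts[1]? is some
      obtain ⟨v, hv⟩ : ∃ v, (((PySem.Str.split? l ": ").getD [])[1]? : Option String) = some v :=
        ⟨_, List.getElem?_eq_getElem h2⟩
      simp [hv]
    · -- parts[1]? = none
      have : (((PySem.Str.split? l ": ").getD [])[1]? : Option String) = none :=
        List.getElem?_eq_none (by omega)
      simp [this]
    · simp

-- ===== VERDICT (by name: the statement is the Claim_ definition above) =====
theorem get_outcome_spec : Claim_equal_get_outcome := by
  intro data _ _
  unfold Spec_get_outcome get_outcome get_outcome_alt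
  simp [foldl_aStep_eq]
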